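-- pv_equiv track=rewrite | github.com/napalm-automation/napalm | napalm_ros/utils.py | print_to_values_structured
-- ===== SOURCE A (Python) =====
-- def parse_as_key_value(keys_and_values):
--     as_key_value = {}
--
--     last_key = None
--     for kv_part in keys_and_values:
--         if kv_part.find('=') != -1:
--             key, value = kv_part.split('=', 1)
--             if key in as_key_value:
--                 raise KeyError('Key already seen - [{}]'.format(key))
--             as_key_value[key] = value
--             last_key = key
--         elif last_key is not None:
--             as_key_value[last_key] += ' {}'.format(kv_part)
--         else:
--             raise ValueError(kv_part)
--     return as_key_value
--
-- def print_to_values_structured(print_output):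
--     to_values_structured = []
--     for line in print_output:
--         line_parts = line.strip().split()
--         if len(line_parts) == 0:
--             continue
--         if line_parts[0].isdigit():
--             index_seen = line_parts.pop(0)
--         else:
--             index_seen = -1
--         flags_seen = ''
--         while True:
--             if not len(line_parts):
--                 raise ValueError('No parts available')
--             part = line_parts.pop(0)
--             if part.find('=') == -1:
--                 flags_seen += part
--             else:
--                 line_parts.insert(0, part)
--                 line_parts.insert(0, 'flags={}'.format(flags_seen))
--                 line_parts.insert(0, 'index={}'.format(index_seen))
--                 break
--         to_values_structured.append(parse_as_key_value(line_parts))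
--     return to_values_structured
-- ===== SOURCE B (Python) =====
-- def print_to_values_structured(print_output):
--     result = []
--     for line in print_output:
--         tokens = line.strip().split()
--         if not tokens:
--             continue
--         if tokens[0].isdigit():
--             index, tokens = tokens[0], tokens[1:]
--         else:
--             index = '-1'
--         pos = next((j for j, tok in enumerate(tokens) if '=' in tok), None)
--         if pos is None:
--             raise ValueError('No parts available')
--         entry = {'index': index, 'flags': ''.join(tokens[:pos])}
--         last_key = None
--         for tok in tokens[pos:]:
--             if '=' in tok:
--                 key, value = tok.split('=', 1)
--                 if key in entry:
--                     raise KeyError('Key already seen - [{}]'.format(key))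
--                 entry[key] = value
--                 last_key = key
--             else:
--                 entry[last_key] += ' ' + tok
--         result.append(entry)
--     return result
-- ===== Notes on version B (the rewrite author's own statement) =====
-- stated objective: simpler
-- what changed: B drops A's sentinel-token re-injection ('index=…','flags=…' pushed back into the token list) and the separate parse_as_key_value helper: it locates the first '='-token with one enumerate scan, joins the flag prefix, seeds the dict with 'index' and 'flags' directly, and fills it in a single loop over the remaining tokens.
import Mathlib
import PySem

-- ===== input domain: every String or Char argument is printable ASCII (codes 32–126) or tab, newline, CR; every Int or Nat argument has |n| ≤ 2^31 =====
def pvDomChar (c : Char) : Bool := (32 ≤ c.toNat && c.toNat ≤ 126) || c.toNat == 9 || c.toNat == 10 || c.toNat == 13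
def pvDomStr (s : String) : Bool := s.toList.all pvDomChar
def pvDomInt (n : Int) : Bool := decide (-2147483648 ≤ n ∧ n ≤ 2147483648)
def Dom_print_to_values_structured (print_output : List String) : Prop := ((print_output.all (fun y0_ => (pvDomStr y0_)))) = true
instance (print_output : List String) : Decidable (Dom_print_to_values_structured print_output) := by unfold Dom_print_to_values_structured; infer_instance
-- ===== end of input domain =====

-- B re-implements A by one direct pass per line (find the first '='-token, join the flag
-- tokens, build the dict directly) instead of A's pop/insert sentinel-token re-injection
-- plus separate parse_as_key_value helper; objective: simpler. Where the Python raises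
-- (no '='-token on a nonempty line, duplicate key) both ports skip the line; Pre_ excludes
-- exactly those inputs.

-- ===== PORT A =====
-- parse_as_key_value: dict + last_key accumulator; `none` = the KeyError / ValueError raises.
def pvParseAsKeyValue : List String → PySem.Dict String String → Option String → Option (PySem.Dict String String)
  | [], d, _ => some d
  | kv :: rest, d, lastKey =>
    if PySem.Str.find kv "=" ≠ -1 then
      match PySem.Str.splitMax? kv "=" 1 with
      | some (key :: value :: _) =>
        if d.contains key then none  -- raise KeyError('Key already seen - […]')
        else pvParseAsKeyValue rest (d.insert key value) (some key)
      | _ => none  -- unreachable: '=' present gives exactly two parts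
    else
      match lastKey with
      | some k => pvParseAsKeyValue rest (d.modify k "" (fun v => v ++ " " ++ kv)) lastKey
        -- as_key_value[last_key] += ' {}'.format(kv_part); last_key is always present, default unused
      | none => none  -- raise ValueError(kv_part)

-- the `while True` pop loop: accumulate flag tokens until the first token containing '=';
-- `none` = raise ValueError('No parts available')
def pvScanFlags : List String → String → Option (String × List String)
  | [], _ => none
  | part :: rest, flagsSeen =>
    if PySem.Str.find part "=" = -1 then pvScanFlags rest (flagsSeen ++ part)
    else some (flagsSeen, part :: rest)

-- one line of A's outer loop; `none` = line skipped (empty) or an exception was raised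
def pvLineA (line : String) : Option (List (String × String)) :=
  match PySem.Str.split₀ (PySem.Str.strip line) with
  | [] => none
  | t0 :: rest0 =>
    -- index_seen is the popped digit token, else the int -1; 'index={}'.format(-1) = "index=-1"
    let indexSeen := if PySem.Str.strIsdigit t0 then t0 else "-1"
    let lineParts := if PySem.Str.strIsdigit t0 then rest0 else t0 :: rest0
    match pvScanFlags lineParts "" with
    | none => none
    | some (flagsSeen, rest) =>
      match pvParseAsKeyValue (("index=" ++ indexSeen) :: ("flags=" ++ flagsSeen) :: rest)
          PySem.Dict.empty none with
      | none => none
      | some d => some d.items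

def print_to_values_structured (print_output : List String) : List (List (String × String)) :=
  print_output.foldl (fun acc line =>
    match pvLineA line with
    | some e => acc ++ [e]
    | none => acc) []

-- ===== PORT B =====
-- Source B's inner for-loop body over the remaining tokens, as a fold step on (entry, last_key)
def pvEntryStep (st : Option (PySem.Dict String String × Option String)) (tok : String) :
    Option (PySem.Dict String String × Option String) :=
  match st with
  | none => none
  | some (entry, lastKey) =>
    if PySem.Str.isIn "=" tok then
      match PySem.Str.splitMax? tok "=" 1 with
      | some (key :: value :: _) =>
        if entry.contains key then none  -- raise KeyError('Key already seen - […]')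
        else some (entry.insert key value, some key)
      | _ => none  -- unreachable
    else
      match lastKey with
      | some k => some (entry.modify k "" (fun v => v ++ " " ++ tok), lastKey)
      | none => none  -- entry[None]: unreachable error

-- one line of Source B's loop; `none` = line skipped (empty) or an exception was raised
def pvLineB (line : String) : Option (List (String × String)) :=
  match PySem.Str.split₀ (PySem.Str.strip line) with
  | [] => none
  | t0 :: rest0 =>
    let index := if PySem.Str.strIsdigit t0 then t0 else "-1"
    let toks := if PySem.Str.strIsdigit t0 then rest0 else t0 :: rest0
    match toks.findIdx? (fun t => PySem.Str.isIn "=" t) with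
    | none => none  -- raise ValueError('No parts available')
    | some pos =>
      let entry0 := PySem.Dict.ofList [("index", index), ("flags", PySem.Str.join "" (toks.take pos))]
      match (toks.drop pos).foldl pvEntryStep (some (entry0, none)) with
      | some (entry, _) => some entry.items
      | none => none

def print_to_values_structured_alt (print_output : List String) : List (List (String × String)) :=
  print_output.foldl (fun acc line =>
    match pvLineB line with
    | some e => acc ++ [e]
    | none => acc) []

-- ===== PRECONDITION & SPEC =====
-- first part of a key=value token (the part before the first '=')
def pvKeyOf (t : String) : String :=
  match PySem.Str.splitMax? t "=" 1 with
  | some (k :: _) => k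
  | _ => t

-- Pre_ excludes exactly the lines on which the Python raises: a nonempty line with no
-- '='-containing token (ValueError), and a line whose key=value keys — together with the
-- synthetic 'index' and 'flags' keys — repeat (KeyError).
def Pre_print_to_values_structured (print_output : List String) : Prop :=
  ∀ line ∈ print_output,
    (let ts := PySem.Str.split₀ (PySem.Str.strip line)
     ts = [] ∨
       (let ts1 := if PySem.Str.strIsdigit (ts.headD "") then ts.tail else ts
        let rest := ts1.dropWhile (fun t => !PySem.Str.isIn "=" t)
        rest ≠ [] ∧
          ("index" :: "flags" ::
            (rest.filter (fun t => PySem.Str.isIn "=" t)).map pvKeyOf).Nodup))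

instance (print_output : List String) : Decidable (Pre_print_to_values_structured print_output) := by
  unfold Pre_print_to_values_structured; infer_instance

def pvWitness_print_to_values_structured : List String :=
  ["", " 0 X dst-address=1.2.3.4/32 gateway=bridge", "mtu=1500 comment=a b"]

def Spec_print_to_values_structured (print_output : List String) (out : List (List (String × String))) : Prop := out = print_to_values_structured_alt print_output
instance (print_output : List String) (out : List (List (String × String))) : Decidable (Spec_print_to_values_structured print_output out) := by unfold Spec_print_to_values_structured; infer_instance

-- ===== CLAIM (what is proved, stated in full; the proofs are below) =====
def Claim_equal_print_to_values_structured : Prop := ∀ (print_output : List String), Dom_print_to_values_structured print_output → Pre_print_to_values_structured print_output → Spec_print_to_values_structured print_output (print_to_values_structured print_output)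

-- ===== LEMMAS AND PROOFS =====

lemma pv_intercalate_nil (ll : List (List Char)) : List.intercalate ([] : List Char) ll = ll.flatten := by
  induction ll with
  | nil => rfl
  | cons a l ih => cases l <;> simp_all [List.intercalate]

lemma pv_join_cons (t : String) (parts : List String) :
    PySem.Str.join "" (t :: parts) = t ++ PySem.Str.join "" parts := by
  simp [PySem.Str.join, PySem.Chars.join, pv_intercalate_nil, String.ofList_append,
    String.ofList_toList]

lemma pv_join_nil : PySem.Str.join "" ([] : List String) = "" := rfl

-- A's find-based test agrees with B's membership test
lemma pv_find_isIn (t : String) : (PySem.Str.find t "=" = -1) ↔ (PySem.Str.isIn "=" t = false) := by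
  rw [PySem.Str.find_eq_neg_one_iff, ← PySem.Str.isIn_iff_infix]
  simp

lemma pv_find_ne (t : String) (hi : PySem.Str.isIn "=" t = true) : ¬ (PySem.Str.find t "=" = -1) :=
  fun h0 => by rw [(pv_find_isIn t).mp h0] at hi; exact Bool.false_ne_true hi

lemma pv_find_eq (t : String) (hi : PySem.Str.isIn "=" t = false) : PySem.Str.find t "=" = -1 :=
  (pv_find_isIn t).mpr hi

-- the scan loop = find-first-index + join-of-prefix + suffix
lemma pv_scan_eq (l : List String) : ∀ (flags : String),
    pvScanFlags l flags =
      match l.findIdx? (fun t => PySem.Str.isIn "=" t) with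
      | none => none
      | some pos => some (flags ++ PySem.Str.join "" (l.take pos), l.drop pos) := by
  induction l with
  | nil => intro flags; simp [pvScanFlags]
  | cons t rest ih =>
    intro flags
    rw [List.findIdx?_cons]
    cases hi : PySem.Str.isIn "=" t with
    | true =>
      rw [if_pos rfl]
      simp only [pvScanFlags]
      rw [if_neg (pv_find_ne t hi)]
      simp [pv_join_nil]
    | false =>
      rw [if_neg Bool.false_ne_true]
      simp only [pvScanFlags]
      rw [if_pos (pv_find_eq t hi), ih]
      cases h : List.findIdx? (fun t => PySem.Str.isIn "=" t) rest with
      | none => rfl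
      | some pos => simp [pv_join_cons, String.append_assoc]

-- pvEntryStep is absorbing on none
lemma pv_fold_none (l : List String) : l.foldl pvEntryStep none = none := by
  induction l with
  | nil => rfl
  | cons t l ih => simpa [pvEntryStep] using ih

-- B's fill fold computes A's parse helper
lemma pv_fold_eq_parse (l : List String) : ∀ (d : PySem.Dict String String) (la : Option String),
    (l.foldl pvEntryStep (some (d, la))).map Prod.fst = pvParseAsKeyValue l d la := by
  induction l with
  | nil => intro d la; rfl
  | cons kv rest ih =>
    intro d la
    rw [List.foldl_cons]
    show (List.foldl pvEntryStep (pvEntryStep (some (d, la)) kv) rest).map Prod.fst = _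
    simp only [pvParseAsKeyValue, pvEntryStep]
    cases hi : PySem.Str.isIn "=" kv with
    | true =>
      rw [if_pos rfl, if_pos (pv_find_ne kv hi)]
      cases hs : PySem.Str.splitMax? kv "=" 1 with
      | none => simp [pv_fold_none]
      | some parts =>
        match parts with
        | [] => simp [pv_fold_none]
        | [k] => simp [pv_fold_none]
        | k :: v :: more =>
          show Option.map Prod.fst (List.foldl pvEntryStep
              (if d.contains k = true then none else some (d.insert k v, some k)) rest) =
            if d.contains k = true then none else pvParseAsKeyValue rest (d.insert k v) (some k)
          cases hc : d.contains k with
          | true => rw [if_pos rfl]; simp [pv_fold_none]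
          | false => rw [if_neg Bool.false_ne_true]; exact ih _ _
    | false =>
      rw [if_neg Bool.false_ne_true, if_neg (not_not_intro (pv_find_eq kv hi))]
      cases la with
      | none => simp [pv_fold_none]
      | some k => exact ih _ _

-- A's parse ignores the incoming last_key when the list is empty or starts with a '='-token
lemma pv_parse_la (rest : List String) (d : PySem.Dict String String) (la la' : Option String)
    (h : rest = [] ∨ ∃ t rt, rest = t :: rt ∧ PySem.Str.isIn "=" t = true) :
    pvParseAsKeyValue rest d la = pvParseAsKeyValue rest d la' := by
  rcases h with rfl | ⟨t, rt, rfl, ht⟩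
  · rfl
  · simp only [pvParseAsKeyValue]
    rw [if_pos (pv_find_ne t ht), if_pos (pv_find_ne t ht)]

lemma pv_findIdx?_drop {p : String → Bool} (l : List String) : ∀ (pos : Nat),
    l.findIdx? p = some pos → ∃ t rt, l.drop pos = t :: rt ∧ p t = true := by
  induction l with
  | nil => intro pos h; simp at h
  | cons a l ih =>
    intro pos h
    rw [List.findIdx?_cons] at h
    by_cases ha : p a
    · simp [ha] at h; subst h; exact ⟨a, l, rfl, ha⟩
    · simp [ha] at h
      obtain ⟨pos', h', rfl⟩ := h
      simpa using ih pos' h'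

-- splitting 'pre=suf' at the first '=' when pre has no '='
lemma pv_go_m0 (fuel : Nat) (l cur : List Char) (acc : List (List Char)) :
    PySem.Chars.splitOnMax.go ['='] fuel 0 l cur acc = ((cur.reverse ++ l) :: acc).reverse := by
  cases fuel with
  | zero => simp [PySem.Chars.splitOnMax.go]
  | succ n => cases l <;> simp [PySem.Chars.splitOnMax.go]

lemma pv_go_main (pre : List Char) : '=' ∉ pre → ∀ (fuel : Nat), pre.length + 1 ≤ fuel →
    ∀ (suf cur : List Char) (acc : List (List Char)),
    PySem.Chars.splitOnMax.go ['='] fuel 1 (pre ++ '=' :: suf) cur acc =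
      acc.reverse ++ [cur.reverse ++ pre, suf] := by
  induction pre with
  | nil =>
    intro _ fuel hfuel suf cur acc
    match fuel, hfuel with
    | n + 1, _ =>
      simp only [List.nil_append, PySem.Chars.splitOnMax.go]
      rw [if_neg one_ne_zero, if_pos (by simp [List.isPrefixOf])]
      simp [pv_go_m0]
  | cons c pre' ihp =>
    intro h fuel hfuel suf cur acc
    have hc : c ≠ '=' := fun hcc => h (hcc ▸ List.mem_cons_self)
    have h' : '=' ∉ pre' := fun hm => h (List.mem_cons_of_mem _ hm)
    match fuel, hfuel with
    | n + 1, hfuel =>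
      have hn : pre'.length + 1 ≤ n := by simp at hfuel; omega
      simp only [List.cons_append, PySem.Chars.splitOnMax.go]
      rw [if_neg one_ne_zero, if_neg (by simp [List.isPrefixOf]; exact fun hh => hc hh.symm)]
      rw [ihp h' n hn suf (c :: cur) acc]
      simp

lemma pv_splitMax_sentinel (s pre suf : String)
    (hs : s.toList = pre.toList ++ '=' :: suf.toList) (h : ('=' : Char) ∉ pre.toList) :
    PySem.Str.splitMax? s "=" 1 = some [pre, suf] := by
  unfold PySem.Str.splitMax? PySem.Chars.splitMax?
  rw [if_neg (by decide)]
  unfold PySem.Chars.splitOnMax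
  rw [if_neg (by decide)]
  show some ((PySem.Chars.splitOnMax.go "=".toList (s.toList.length + 1) (1 : Int).toNat
      s.toList [] []).map String.ofList) = _
  have hlen : pre.toList.length + 1 ≤ s.toList.length + 1 := by
    rw [hs]; simp
  rw [show "=".toList = ['='] from rfl, show ((1 : Int).toNat) = 1 from rfl, hs,
    pv_go_main pre.toList h _ (by rw [← hs]; exact hlen) suf.toList [] []]
  simp [String.ofList_toList]

lemma pv_isIn_of_mem (s : String) (h : ('=' : Char) ∈ s.toList) : PySem.Str.isIn "=" s = true := by
  rw [PySem.Str.isIn_iff_infix, show "=".toList = ['='] from rfl]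
  exact (List.singleton_infix_iff _ _).mpr h

lemma pv_sent_index (I : String) :
    ("index=" ++ I).toList = "index".toList ++ '=' :: I.toList := by
  rw [String.toList_append, show "index=".toList = "index".toList ++ ['='] from rfl,
    List.append_assoc]; rfl

lemma pv_sent_flags (F : String) :
    ("flags=" ++ F).toList = "flags".toList ++ '=' :: F.toList := by
  rw [String.toList_append, show "flags=".toList = "flags".toList ++ ['='] from rfl,
    List.append_assoc]; rfl

-- A's two sentinel-token parse steps just pre-load the dict B starts from
lemma pv_sent_steps (I F : String) (R : List String) :
    pvParseAsKeyValue (("index=" ++ I) :: ("flags=" ++ F) :: R) PySem.Dict.empty none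
      = pvParseAsKeyValue R ((PySem.Dict.empty.insert "index" I).insert "flags" F)
          (some "flags") := by
  simp only [pvParseAsKeyValue]
  rw [if_pos (pv_find_ne _ (pv_isIn_of_mem _ (by rw [pv_sent_index]; simp))),
    pv_splitMax_sentinel _ "index" I (pv_sent_index I) (by decide)]
  simp only [PySem.Dict.contains_empty, Bool.false_eq_true, if_false]
  rw [if_pos (pv_find_ne _ (pv_isIn_of_mem _ (by rw [pv_sent_flags]; simp))),
    pv_splitMax_sentinel _ "flags" F (pv_sent_flags F) (by decide)]
  simp [PySem.Dict.contains_insert, PySem.Dict.contains_empty]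

-- the per-line results agree
lemma pv_line_eq (line : String) : pvLineA line = pvLineB line := by
  unfold pvLineA pvLineB
  cases hts : PySem.Str.split₀ (PySem.Str.strip line) with
  | nil => rfl
  | cons t0 rest0 =>
    simp only
    rw [pv_scan_eq]
    cases hf : (if PySem.Str.strIsdigit t0 then rest0 else t0 :: rest0).findIdx?
        (fun t => PySem.Str.isIn "=" t) with
    | none => rfl
    | some pos =>
      obtain ⟨t, rt, hdrop, ht⟩ := pv_findIdx?_drop _ pos hf
      simp only [String.empty_append]
      rw [pv_sent_steps,
        pv_parse_la _ _ (some "flags") none (Or.inr ⟨t, rt, hdrop, ht⟩),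
        ← pv_fold_eq_parse]
      rw [show PySem.Dict.ofList [("index", (if PySem.Str.strIsdigit t0 then t0 else "-1")),
            ("flags", PySem.Str.join ""
              ((if PySem.Str.strIsdigit t0 then rest0 else t0 :: rest0).take pos))]
          = (PySem.Dict.empty.insert "index" (if PySem.Str.strIsdigit t0 then t0 else "-1")).insert
              "flags" (PySem.Str.join ""
                ((if PySem.Str.strIsdigit t0 then rest0 else t0 :: rest0).take pos)) from rfl]
      cases hfold : ((if PySem.Str.strIsdigit t0 then rest0 else t0 :: rest0).drop pos).foldl
          pvEntryStep (some ((PySem.Dict.empty.insert "index"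
            (if PySem.Str.strIsdigit t0 then t0 else "-1")).insert "flags"
              (PySem.Str.join ""
                ((if PySem.Str.strIsdigit t0 then rest0 else t0 :: rest0).take pos)), none)) with
      | none => simp
      | some pr => simp

-- ===== VERDICT (by name: the statement is the Claim_ definition above) =====
theorem print_to_values_structured_spec : Claim_equal_print_to_values_structured := by
  intro po _ _
  unfold Spec_print_to_values_structured print_to_values_structured print_to_values_structured_alt
  exact PySem.List.foldl_congr_mem _ _ _ _ (fun acc line _ => by rw [pv_line_eq])
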